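-- pv_equiv track=rewrite | github.com/SusanSoucia/S-AES | utils.py | str_to_hex_blocks
-- ===== SOURCE A (Python) =====
-- def str_to_hex_blocks(text):
--     """将字符串转换为16位十六进制块的列表"""
--     blocks = []
--     # 将字符串转换为字节
--     bytes_data = text.encode('ascii')
--
--     # 按2字节一组处理
--     for i in range(0, len(bytes_data), 2):
--         # 提取2字节
--         block_bytes = bytes_data[i:i + 2]
--         # 如果不足2字节，补0
--         if len(block_bytes) < 2:
--             block_bytes += b'\x00' * (2 - len(block_bytes))
--         # 转换为16位整数
--         block = int.from_bytes(block_bytes, byteorder='big')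
--         blocks.append(block)
--
--     return blocks
-- ===== SOURCE B (Python) =====
-- def str_to_hex_blocks(text):
--     """将字符串转换为16位十六进制块的列表"""
--     data = text.encode('ascii')
--     if len(data) % 2:
--         data += b'\x00'  # one-time padding up front instead of per-block
--     it = iter(data)
--     return [256 * hi + lo for hi, lo in zip(it, it)]
-- ===== Notes on version B (the rewrite author's own statement) =====
-- stated objective: idiomatic
-- what changed: B normalizes once (pad a single zero byte when the encoded length is odd) and then pairs consecutive bytes with zip over one iterator, instead of indexing with range(0,n,2), slicing and per-block padding and int.from_bytes.
import Mathlib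
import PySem

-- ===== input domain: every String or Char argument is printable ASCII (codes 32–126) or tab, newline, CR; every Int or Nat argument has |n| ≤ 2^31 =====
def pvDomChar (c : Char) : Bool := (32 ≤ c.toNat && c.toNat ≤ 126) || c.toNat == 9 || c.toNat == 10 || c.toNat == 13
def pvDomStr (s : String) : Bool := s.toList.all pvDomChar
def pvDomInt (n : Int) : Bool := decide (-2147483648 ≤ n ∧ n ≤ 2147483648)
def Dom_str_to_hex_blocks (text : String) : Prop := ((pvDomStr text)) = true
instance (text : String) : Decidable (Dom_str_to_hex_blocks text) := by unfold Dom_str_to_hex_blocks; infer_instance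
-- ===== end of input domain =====

-- B pads a single zero byte once up front when the length is odd, then pairs
-- consecutive bytes directly, instead of A's range(0,n,2) index loop with
-- per-block slicing and padding; same values, more idiomatic decomposition.

-- ===== PORT A =====
-- int.from_bytes(bs, 'big')
def pvFromBytesBig (bs : List Nat) : Int := ((bs.foldl (fun a b => a * 256 + b) 0 : Nat) : Int)

def str_to_hex_blocks (text : String) : List Int :=
  let bytesData := text.toList.map Char.toNat
  (PySem.List.pyRange 0 (bytesData.length : Int) 2).foldl
    (fun blocks i =>
      let blockBytes := PySem.List.slice bytesData (some i) (some (i + 2))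
      let blockBytes :=
        if blockBytes.length < 2 then blockBytes ++ List.replicate (2 - blockBytes.length) 0
        else blockBytes
      blocks ++ [pvFromBytesBig blockBytes])
    []

-- ===== PORT B =====
def pvPairs : List Nat → List Int
  | hi :: lo :: rest => ((256 * hi + lo : Nat) : Int) :: pvPairs rest
  | _ => []

def str_to_hex_blocks_alt (text : String) : List Int :=
  let data := text.toList.map Char.toNat
  let data := if data.length % 2 == 1 then data ++ [0] else data
  pvPairs data

-- ===== PRECONDITION & SPEC =====
def Spec_str_to_hex_blocks (text : String) (out : List Int) : Prop := out = str_to_hex_blocks_alt text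
instance (text : String) (out : List Int) : Decidable (Spec_str_to_hex_blocks text out) := by unfold Spec_str_to_hex_blocks; infer_instance

-- ===== CLAIM (what is proved, stated in full; the proofs are below) =====
def Claim_equal_str_to_hex_blocks : Prop := ∀ (text : String), Dom_str_to_hex_blocks text → Spec_str_to_hex_blocks text (str_to_hex_blocks text)

-- ===== LEMMAS AND PROOFS =====

def pvPad (l : List Nat) : List Nat := if l.length % 2 == 1 then l ++ [0] else l

lemma pvPad_cons_cons (a b : Nat) (l : List Nat) : pvPad (a :: b :: l) = a :: b :: pvPad l := by
  unfold pvPad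
  have h : (a :: b :: l).length % 2 = l.length % 2 := by simp; omega
  rw [h]
  split_ifs <;> simp

lemma pyRange_two_nil (i len : Nat) (h : len ≤ i) :
    PySem.List.pyRange (i : Int) (len : Int) 2 = [] := by
  rw [PySem.List.pyRange_of_pos _ _ (by norm_num)]
  have : ¬ ((i : Int) < (len : Int)) := by exact_mod_cast not_lt.mpr h
  simp [this]

lemma pyRange_two_cons (i len : Nat) (h : i < len) :
    PySem.List.pyRange (i : Int) (len : Int) 2
      = (i : Int) :: PySem.List.pyRange ((i : Int) + 2) (len : Int) 2 := by
  rw [PySem.List.pyRange_of_pos _ _ (by norm_num : (0:Int) < 2),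
      PySem.List.pyRange_of_pos _ _ (by norm_num : (0:Int) < 2)]
  have hi : (i : Int) < (len : Int) := by exact_mod_cast h
  have hcount : (((len : Int) - i + 2 - 1) / 2).toNat
      = (if (i : Int) + 2 < (len : Int) then (((len : Int) - ((i:Int)+2) + 2 - 1) / 2).toNat else 0) + 1 := by
    split_ifs with h2 <;> omega
  simp only [hi, if_pos, hcount, List.range_succ_eq_map, List.map_cons, List.map_map]
  refine List.cons_eq_cons.mpr ⟨by push_cast; ring, ?_⟩
  refine List.map_congr_left ?_
  intro k hk
  simp only [Function.comp_apply]
  push_cast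
  ring

lemma loop_eq (l : List Nat) (k : Nat) :
    ∀ (i : Nat) (acc : List Int), l.length - i ≤ k →
    (PySem.List.pyRange (i : Int) (l.length : Int) 2).foldl
      (fun blocks j =>
        let blockBytes := PySem.List.slice l (some j) (some (j + 2))
        let blockBytes :=
          if blockBytes.length < 2 then blockBytes ++ List.replicate (2 - blockBytes.length) 0
          else blockBytes
        blocks ++ [pvFromBytesBig blockBytes])
      acc
    = acc ++ pvPairs (pvPad (l.drop i)) := by
  induction k with
  | zero =>
      intro i acc hk
      have hle : l.length ≤ i := by omega
      rw [pyRange_two_nil i l.length hle, List.drop_eq_nil_of_le hle]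
      simp [pvPad, pvPairs]
  | succ k ih =>
      intro i acc hk
      by_cases hle : l.length ≤ i
      · rw [pyRange_two_nil i l.length hle, List.drop_eq_nil_of_le hle]
        simp [pvPad, pvPairs]
      · have hlt : i < l.length := by omega
        rw [pyRange_two_cons i l.length hlt, List.foldl_cons]
        have hslice : PySem.List.slice l (some (i : Int)) (some ((i : Int) + 2))
            = (l.drop i).take 2 := by
          have h := PySem.List.slice_natCast_add l i 2
          push_cast at h
          exact h
        have hdrop2 : l.drop (i + 2) = (l.drop i).drop 2 := by
          rw [List.drop_drop]
        rcases hr : l.drop i with _ | ⟨a, t⟩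
        · exact absurd (List.drop_eq_nil_iff.mp hr) (by omega)
        · rcases t with _ | ⟨b, r'⟩
          · -- one trailing byte: len = i + 1
            have hlen1 : l.length = i + 1 := by
              have := congrArg List.length hr
              simp [List.length_drop] at this
              omega
            have hnil : PySem.List.pyRange ((i : Int) + 2) (l.length : Int) 2 = [] := by
              have h := pyRange_two_nil (i + 2) l.length (by omega)
              push_cast at h
              exact h
            rw [hnil]
            simp only [List.foldl_nil, hslice, hr]
            simp [pvPad, pvPairs, pvFromBytesBig]
            ring
          · -- two bytes available
            have hrest := ih (i + 2) (acc ++ [pvFromBytesBig [a, b]]) (by omega)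
            push_cast at hrest
            simp only [hslice, hr, List.take_succ_cons, List.take_zero, List.length_cons,
              List.length_nil]
            rw [if_neg (by omega), hrest, hdrop2, hr]
            simp only [List.drop_succ_cons, List.drop_zero, pvPad_cons_cons, pvPairs,
              pvFromBytesBig, List.foldl_cons, List.foldl_nil, List.append_assoc,
              List.cons_append, List.nil_append]
            push_cast
            ring_nf

-- ===== VERDICT (by name: the statement is the Claim_ definition above) =====
theorem str_to_hex_blocks_spec : Claim_equal_str_to_hex_blocks := by
  intro text _
  unfold Spec_str_to_hex_blocks str_to_hex_blocks str_to_hex_blocks_alt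
  have h := loop_eq (text.toList.map Char.toNat) (text.toList.map Char.toNat).length 0 [] (by omega)
  simpa [pvPad] using h
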